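-- pv_equiv track=rewrite | github.com/jason-c-dev/cli.mail.app | src/mailctl/commands/compose.py | _escape_applescript_string
-- ===== SOURCE A (Python) =====
-- def _escape_applescript_string(value: str) -> str:
--     """Escape a Python string for safe inclusion in an AppleScript literal.
--
--     Backslashes and double-quotes are escaped.  Newlines are converted to
--     AppleScript ``& return &`` concatenation so multi-line bodies survive
--     the journey into Mail.app.
--     """
--     # Escape backslashes first, then double quotes.
--     escaped = value.replace("\\", "\\\\").replace('"', '\\"')
--
--     # Replace CR/LF with AppleScript concatenation of `return` so that
--     # newlines in the body carry through to Mail.app.  We split, wrap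
--     # each line in quotes, and join with ``& return &``.
--     # First normalise CRLF -> LF.
--     escaped = escaped.replace("\r\n", "\n").replace("\r", "\n")
--     if "\n" not in escaped:
--         return f'"{escaped}"'
--
--     lines = escaped.split("\n")
--     quoted = [f'"{line}"' for line in lines]
--     return " & return & ".join(quoted)
-- ===== SOURCE B (Python) =====
-- def _escape_applescript_string(value: str) -> str:
--     """Single left-to-right scan: escape chars into per-line buffers, then
--     quote each buffer and join with AppleScript's ``& return &``."""
--     lines = [[]]
--     i = 0
--     n = len(value)
--     while i < n:
--         c = value[i]
--         if c == "\\":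
--             lines[-1].append("\\\\")
--         elif c == '"':
--             lines[-1].append('\\"')
--         elif c == "\n":
--             lines.append([])
--         elif c == "\r":
--             lines.append([])
--             if i + 1 < n and value[i + 1] == "\n":
--                 i += 1  # CRLF is a single line break
--         else:
--             lines[-1].append(c)
--         i += 1
--     return " & return & ".join('"' + "".join(buf) + '"' for buf in lines)
-- ===== Notes on version B (the rewrite author's own statement) =====
-- stated objective: alternative
-- what changed: Replaces A's five-pass pipeline (two escape replaces, two newline-normalising replaces, then split/wrap/join) by a single left-to-right scan that escapes characters into per-line buffers, swallowing the LF of a CRLF pair in place, then quotes and joins the buffers.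
import Mathlib
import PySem

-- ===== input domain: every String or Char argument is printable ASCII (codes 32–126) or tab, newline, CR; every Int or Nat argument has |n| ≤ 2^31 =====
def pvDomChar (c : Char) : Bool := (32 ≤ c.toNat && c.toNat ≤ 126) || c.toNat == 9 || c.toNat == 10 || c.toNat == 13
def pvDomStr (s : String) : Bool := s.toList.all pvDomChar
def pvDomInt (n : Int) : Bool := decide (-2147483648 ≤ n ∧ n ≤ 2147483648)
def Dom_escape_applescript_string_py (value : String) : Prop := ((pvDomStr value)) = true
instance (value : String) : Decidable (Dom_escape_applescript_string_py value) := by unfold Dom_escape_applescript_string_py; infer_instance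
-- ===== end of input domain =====

-- B replaces A's replace/replace/replace/replace/split/join pipeline by one character scan into line buffers (alternative decomposition, same cost).

-- ===== PORT A =====
def escape_applescript_string_py (value : String) : String :=
  -- escaped = value.replace("\\", "\\\\").replace('"', '\\"')
  let escaped := PySem.Str.replace (PySem.Str.replace value "\\" "\\\\") "\"" "\\\""
  -- escaped = escaped.replace("\r\n", "\n").replace("\r", "\n")
  let escaped := PySem.Str.replace (PySem.Str.replace escaped "\r\n" "\n") "\r" "\n"
  if PySem.Str.isIn "\n" escaped = false then
    -- f'"{escaped}"'  (exact: the chars are quote, escaped's chars, quote)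
    String.ofList ('"' :: escaped.toList ++ ['"'])
  else
    -- lines = escaped.split("\n") — the separator is nonempty, so split? is always `some`
    let lines := (PySem.Str.split? escaped "\n").getD []
    let quoted := lines.map (fun line => String.ofList ('"' :: line.toList ++ ['"']))
    PySem.Str.join " & return & " quoted

-- ===== PORT B =====
-- append a chunk to the current (head) line buffer  (Source B's lines[-1].append)
def pvPushHead (cs : List Char) : List (List Char) → List (List Char)
  | [] => [cs]
  | h :: r => (cs ++ h) :: r

-- Source B's while-loop: one scan, dispatch on the character; a CR swallows an
-- immediately following LF (Source B's `i += 1` inside the '\r' branch)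
def pvAltLines : List Char → List (List Char)
  | [] => [[]]
  | '\r' :: '\n' :: t => [] :: pvAltLines t
  | '\r' :: t => [] :: pvAltLines t
  | '\n' :: t => [] :: pvAltLines t
  | '\\' :: t => pvPushHead ['\\', '\\'] (pvAltLines t)
  | '"' :: t => pvPushHead ['\\', '"'] (pvAltLines t)
  | c :: t => pvPushHead [c] (pvAltLines t)

def escape_applescript_string_py_alt (value : String) : String :=
  PySem.Str.join " & return & "
    ((pvAltLines value.toList).map (fun buf => String.ofList ('"' :: buf ++ ['"'])))

-- ===== PRECONDITION & SPEC =====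
def Spec_escape_applescript_string_py (value : String) (out : String) : Prop := out = escape_applescript_string_py_alt value
instance (value : String) (out : String) : Decidable (Spec_escape_applescript_string_py value out) := by unfold Spec_escape_applescript_string_py; infer_instance

-- ===== CLAIM (what is proved, stated in full; the proofs are below) =====
def Claim_equal_escape_applescript_string_py : Prop := ∀ (value : String), Dom_escape_applescript_string_py value → Spec_escape_applescript_string_py value (escape_applescript_string_py value)

-- ===== LEMMAS AND PROOFS =====

-- characterisation of a single-character `str.replace`
theorem replace_single_go (a : Char) (new : List Char) :
    ∀ (l : List Char) (fuel : Nat) (acc : List Char), l.length ≤ fuel →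
    PySem.Chars.replace.go [a] new fuel l acc
      = acc.reverse ++ l.flatMap (fun c => if c = a then new else [c]) := by
  intro l
  induction l with
  | nil => intro fuel acc h; cases fuel <;> simp [PySem.Chars.replace.go]
  | cons c t ih =>
    intro fuel acc h
    cases fuel with
    | zero => simp at h
    | succ f =>
      simp only [PySem.Chars.replace.go]
      by_cases hc : c = a
      · subst hc
        simp only [List.isPrefixOf, BEq.rfl, Bool.and_self, if_true, List.length_singleton,
          List.drop_succ_cons, List.drop_zero]
        rw [ih f (new.reverse ++ acc) (by simpa using h)]
        simp
      · have hp : ([a].isPrefixOf (c :: t)) = false := by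
          simp only [List.isPrefixOf, Bool.and_eq_false_iff]
          exact Or.inl (by simp only [beq_eq_false_iff_ne, ne_eq]; exact fun hh => hc hh.symm)
        rw [hp]
        simp only [Bool.false_eq_true, if_false]
        rw [ih f (c :: acc) (by simpa using h)]
        simp [hc]

theorem replace_single (a : Char) (new l : List Char) :
    PySem.Chars.replace l [a] new = l.flatMap (fun c => if c = a then new else [c]) := by
  simp only [PySem.Chars.replace, List.isEmpty_cons, Bool.false_eq_true, if_false]
  simpa using replace_single_go a new l l.length [] le_rfl

-- the CRLF → LF normalisation of A's third replace, as a structural function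
def pvNormCRLF : List Char → List Char
  | [] => []
  | '\r' :: '\n' :: t => '\n' :: pvNormCRLF t
  | c :: t => c :: pvNormCRLF t

theorem replace_crlf_go :
    ∀ (l : List Char) (fuel : Nat) (acc : List Char), l.length ≤ fuel →
    PySem.Chars.replace.go ['\r', '\n'] ['\n'] fuel l acc = acc.reverse ++ pvNormCRLF l := by
  intro l
  induction l using pvNormCRLF.induct with
  | case1 => intro fuel acc h; cases fuel <;> simp [PySem.Chars.replace.go, pvNormCRLF]
  | case2 t ih =>
    intro fuel acc h
    cases fuel with
    | zero => simp at h
    | succ f =>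
      simp only [PySem.Chars.replace.go]
      have hp : (['\r', '\n'].isPrefixOf ('\r' :: '\n' :: t)) = true := by
        simp [List.isPrefixOf]
      rw [hp]
      simp only [if_true, List.length_cons, List.length_nil, List.drop_succ_cons, List.drop_zero]
      rw [ih f _ (by simp at h ⊢; omega)]
      simp [pvNormCRLF]
  | case3 c t hne ih =>
    intro fuel acc h
    cases fuel with
    | zero => simp at h
    | succ f =>
      simp only [PySem.Chars.replace.go]
      have hp : (['\r', '\n'].isPrefixOf (c :: t)) = false := by
        cases t with
        | nil =>
          by_cases hcr : c = '\r'
          · subst hcr; simp [List.isPrefixOf]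
          · simp [List.isPrefixOf]
        | cons d t' =>
          by_cases hcr : c = '\r'
          · subst hcr
            have hd : d ≠ '\n' := by intro hd; subst hd; exact hne t' rfl rfl
            simp [List.isPrefixOf, Ne.symm hd]
          · simp [List.isPrefixOf, Ne.symm hcr]
      rw [hp]
      simp only [Bool.false_eq_true, if_false]
      rw [ih f _ (by simpa using h)]
      have : pvNormCRLF (c :: t) = c :: pvNormCRLF t := by
        rw [pvNormCRLF.eq_def]
        cases t with
        | nil =>
          by_cases hcr : c = '\r'
          · subst hcr; rfl
          · simp
        | cons d t' =>
          by_cases hcr : c = '\r'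
          · subst hcr
            have hd : d ≠ '\n' := by intro hd; subst hd; exact hne t' rfl rfl
            simp
          · simp
      rw [this]; simp

theorem replace_crlf (l : List Char) :
    PySem.Chars.replace l ['\r', '\n'] ['\n'] = pvNormCRLF l := by
  simp only [PySem.Chars.replace, List.isEmpty_cons, Bool.false_eq_true, if_false]
  simpa using replace_crlf_go l l.length [] le_rfl

-- the split on '\n' of A's last phase, as a structural function
def pvSplitNL : List Char → List (List Char)
  | [] => [[]]
  | '\n' :: t => [] :: pvSplitNL t
  | c :: t => pvPushHead [c] (pvSplitNL t)

theorem pvSplitNL_ne_nil (l : List Char) : pvSplitNL l ≠ [] := by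
  induction l using pvSplitNL.induct with
  | case1 => simp [pvSplitNL]
  | case2 t ih => simp [pvSplitNL]
  | case3 c t hne ih =>
    have : pvSplitNL (c :: t) = pvPushHead [c] (pvSplitNL t) := by
      rw [pvSplitNL.eq_def]; simp
    rw [this]
    cases h : pvSplitNL t <;> simp [pvPushHead]

theorem pvPushHead_append (x y : List Char) (L : List (List Char)) :
    pvPushHead (x ++ y) L = pvPushHead x (pvPushHead y L) := by
  cases L <;> simp [pvPushHead]

theorem pvPushHead_nil (L : List (List Char)) (h : L ≠ []) : pvPushHead [] L = L := by
  cases L with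
  | nil => exact absurd rfl h
  | cons a r => simp [pvPushHead]

theorem splitOn_nl_go :
    ∀ (l : List Char) (fuel : Nat) (cur : List Char) (acc : List (List Char)),
      l.length < fuel →
    PySem.Chars.splitOn.go ['\n'] fuel l cur acc
      = acc.reverse ++ pvPushHead cur.reverse (pvSplitNL l) := by
  intro l
  induction l using pvSplitNL.induct with
  | case1 =>
    intro fuel cur acc h
    cases fuel with
    | zero => simp at h
    | succ f => simp [PySem.Chars.splitOn.go, pvSplitNL, pvPushHead]
  | case2 t ih =>
    intro fuel cur acc h
    cases fuel with
    | zero => simp at h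
    | succ f =>
      simp only [PySem.Chars.splitOn.go]
      have hp : (['\n'].isPrefixOf ('\n' :: t)) = true := by simp [List.isPrefixOf]
      rw [hp]
      simp only [if_true, List.length_cons, List.length_nil, List.drop_succ_cons, List.drop_zero]
      rw [ih f [] (cur.reverse :: acc) (by simp at h ⊢; omega)]
      cases hs : pvSplitNL t with
      | nil => exact absurd hs (pvSplitNL_ne_nil t)
      | cons a r => simp [pvSplitNL, hs, pvPushHead]
  | case3 c t hne ih =>
    intro fuel cur acc h
    cases fuel with
    | zero => simp at h
    | succ f =>
      simp only [PySem.Chars.splitOn.go]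
      have hp : (['\n'].isPrefixOf (c :: t)) = false := by
        simp only [List.isPrefixOf, Bool.and_eq_false_iff, beq_eq_false_iff_ne, ne_eq]
        exact Or.inl fun hh => hne hh.symm
      rw [hp]
      simp only [Bool.false_eq_true, if_false]
      rw [ih f (c :: cur) acc (by simp at h ⊢; omega)]
      have hs : pvSplitNL (c :: t) = pvPushHead [c] (pvSplitNL t) := by
        rw [pvSplitNL.eq_def]; simp
      rw [hs, ← pvPushHead_append]
      simp

theorem splitOn_nl (l : List Char) :
    PySem.Chars.splitOn l ['\n'] = pvSplitNL l := by
  have := splitOn_nl_go l (l.length + 1) [] [] (by omega)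
  simp only [PySem.Chars.splitOn, this, List.reverse_nil]
  exact pvPushHead_nil _ (pvSplitNL_ne_nil l)

-- the combined backslash/quote escape of A's first two replaces
def pvEsc (c : Char) : List Char :=
  if c = '\\' then ['\\', '\\'] else if c = '"' then ['\\', '"'] else [c]

theorem esc_comp (l : List Char) :
    (l.flatMap fun c => if c = '\\' then ['\\', '\\'] else [c]).flatMap
        (fun c => if c = '"' then ['\\', '"'] else [c])
      = l.flatMap pvEsc := by
  induction l with
  | nil => simp
  | cons c t ih =>
    by_cases h1 : c = '\\'
    · subst h1; simp [pvEsc, ih]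
    · by_cases h2 : c = '"'
      · subst h2; simp [pvEsc, ih]
      · simp [pvEsc, h1, h2, ih]

def pvCr2nl (c : Char) : Char := if c = '\r' then '\n' else c

theorem cr_replace_map (l : List Char) :
    (l.flatMap fun c => if c = '\r' then ['\n'] else [c]) = l.map pvCr2nl := by
  induction l with
  | nil => simp
  | cons c t ih =>
    by_cases h : c = '\r'
    · subst h; simp [pvCr2nl, ih]
    · simp [pvCr2nl, h, ih]

theorem pvNormCRLF_cons (c : Char) (t : List Char) (h : c ≠ '\r') :
    pvNormCRLF (c :: t) = c :: pvNormCRLF t := by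
  rw [pvNormCRLF.eq_def]
  cases t with
  | nil => simp
  | cons d t' => simp [h]

theorem pvNormCRLF_cr (t : List Char) (h : ∀ xs, t ≠ '\n' :: xs) :
    pvNormCRLF ('\r' :: t) = '\r' :: pvNormCRLF t := by
  rw [pvNormCRLF.eq_def]
  cases t with
  | nil => rfl
  | cons d t' =>
    have hd : d ≠ '\n' := fun hh => h t' (by rw [hh])
    simp [hd]

theorem pvSplitNL_cons (c : Char) (t : List Char) (h : c ≠ '\n') :
    pvSplitNL (c :: t) = pvPushHead [c] (pvSplitNL t) := by
  rw [pvSplitNL.eq_def]; simp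

theorem pvEsc_no_nl_head (l : List Char) (h : ∀ xs, l ≠ '\n' :: xs) :
    ∀ xs, l.flatMap pvEsc ≠ '\n' :: xs := by
  cases l with
  | nil => simp
  | cons c t =>
    have hc : c ≠ '\n' := fun hh => h t (by rw [hh])
    intro xs
    by_cases h1 : c = '\\'
    · subst h1; simp [pvEsc]
    · by_cases h2 : c = '"'
      · subst h2; simp [pvEsc]
      · simp [pvEsc, h1, h2, hc]

-- the crux: A's escape + normalise + split pipeline equals B's single scan
theorem main_lemma (l : List Char) :
    pvSplitNL ((pvNormCRLF (l.flatMap pvEsc)).map pvCr2nl) = pvAltLines l := by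
  induction l using pvAltLines.induct with
  | case1 => simp [pvSplitNL, pvNormCRLF, pvAltLines]
  | case2 t ih =>
    show pvSplitNL ((pvNormCRLF (('\r' :: '\n' :: t).flatMap pvEsc)).map pvCr2nl) = [] :: pvAltLines t
    have : ('\r' :: '\n' :: t).flatMap pvEsc = '\r' :: '\n' :: t.flatMap pvEsc := by simp [pvEsc]
    rw [this]
    rw [show pvNormCRLF ('\r' :: '\n' :: t.flatMap pvEsc) = '\n' :: pvNormCRLF (t.flatMap pvEsc) from rfl]
    simp only [List.map_cons, pvCr2nl, if_neg (by decide : ¬('\n' : Char) = '\r')]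
    rw [pvSplitNL.eq_def]
    simp [ih]
  | case3 t hne ih =>
    have hA : pvAltLines ('\r' :: t) = [] :: pvAltLines t := by
      rw [pvAltLines.eq_def]
      cases t with
      | nil => rfl
      | cons d t' =>
        have hd : d ≠ '\n' := fun hh => hne t' (by rw [hh])
        simp
    rw [hA]
    have hE : ('\r' :: t).flatMap pvEsc = '\r' :: t.flatMap pvEsc := by simp [pvEsc]
    rw [hE, pvNormCRLF_cr _ (pvEsc_no_nl_head t (fun xs hh => hne xs hh))]
    simp only [List.map_cons, pvCr2nl]
    rw [pvSplitNL.eq_def]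
    simp [ih]
  | case4 t ih =>
    show pvSplitNL ((pvNormCRLF (('\n' :: t).flatMap pvEsc)).map pvCr2nl) = [] :: pvAltLines t
    have hE : ('\n' :: t).flatMap pvEsc = '\n' :: t.flatMap pvEsc := by simp [pvEsc]
    rw [hE, pvNormCRLF_cons _ _ (by decide)]
    simp only [List.map_cons, pvCr2nl, if_neg (by decide : ¬('\n' : Char) = '\r')]
    rw [pvSplitNL.eq_def]
    simp [ih]
  | case5 t ih =>
    show pvSplitNL ((pvNormCRLF (('\\' :: t).flatMap pvEsc)).map pvCr2nl) = pvPushHead ['\\', '\\'] (pvAltLines t)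
    have hE : ('\\' :: t).flatMap pvEsc = '\\' :: '\\' :: t.flatMap pvEsc := by simp [pvEsc]
    rw [hE, pvNormCRLF_cons _ _ (by decide), pvNormCRLF_cons _ _ (by decide)]
    simp only [List.map_cons, pvCr2nl, if_neg (by decide : ¬('\\' : Char) = '\r')]
    rw [pvSplitNL_cons _ _ (by decide), pvSplitNL_cons _ _ (by decide), ih,
      ← pvPushHead_append]
    rfl
  | case6 t ih =>
    show pvSplitNL ((pvNormCRLF (('"' :: t).flatMap pvEsc)).map pvCr2nl) = pvPushHead ['\\', '"'] (pvAltLines t)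
    have hE : ('"' :: t).flatMap pvEsc = '\\' :: '"' :: t.flatMap pvEsc := by simp [pvEsc]
    rw [hE, pvNormCRLF_cons _ _ (by decide), pvNormCRLF_cons _ _ (by decide)]
    simp only [List.map_cons, pvCr2nl, if_neg (by decide : ¬('\\' : Char) = '\r'),
      if_neg (by decide : ¬('"' : Char) = '\r')]
    rw [pvSplitNL_cons _ _ (by decide), pvSplitNL_cons _ _ (by decide), ih,
      ← pvPushHead_append]
    rfl
  | case7 c t h0 h1 h2 h3 h4 ih =>
    have hcr : c ≠ '\r' := fun hh => h1 hh
    have hnl : c ≠ '\n' := fun hh => h2 hh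
    have hbs : c ≠ '\\' := fun hh => h3 hh
    have hq : c ≠ '"' := fun hh => h4 hh
    have hE : (c :: t).flatMap pvEsc = c :: t.flatMap pvEsc := by simp [pvEsc, hbs, hq]
    have hAlt : pvAltLines (c :: t) = pvPushHead [c] (pvAltLines t) := by
      rw [pvAltLines.eq_def]
      cases t with
      | nil => simp
      | cons d t' => simp
    rw [hAlt, hE, pvNormCRLF_cons _ _ hcr]
    simp only [List.map_cons, pvCr2nl, if_neg hcr]
    rw [pvSplitNL_cons _ _ hnl, ih]

theorem singleton_infix_iff (c : Char) (l : List Char) : [c] <:+: l ↔ c ∈ l := by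
  constructor
  · intro h; exact h.subset (by simp)
  · intro h
    obtain ⟨a, b, rfl⟩ := List.append_of_mem h
    exact ⟨a, b, by simp⟩

theorem pvSplitNL_no_nl (l : List Char) (h : '\n' ∉ l) : pvSplitNL l = [l] := by
  induction l with
  | nil => rfl
  | cons c t ih =>
    have hc : c ≠ '\n' := fun hh => h (by simp [hh])
    rw [pvSplitNL_cons _ _ hc, ih (fun hm => h (List.mem_cons_of_mem _ hm))]
    rfl

-- ===== VERDICT (by name: the statement is the Claim_ definition above) =====
theorem escape_applescript_string_py_spec : Claim_equal_escape_applescript_string_py := by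
  intro value _
  unfold Spec_escape_applescript_string_py escape_applescript_string_py escape_applescript_string_py_alt
  dsimp only
  set l := value.toList with hl
  -- the char list after A's two escaping replaces
  have h1 : PySem.Chars.replace (PySem.Chars.replace l ['\\'] ['\\', '\\']) ['"'] ['\\', '"']
      = l.flatMap pvEsc := by
    rw [replace_single, replace_single]
    exact esc_comp l
  -- the char list after A's two newline-normalising replaces
  set escaped := PySem.Str.replace (PySem.Str.replace
        (PySem.Str.replace (PySem.Str.replace value "\\" "\\\\") "\"" "\\\"") "\r\n" "\n") "\r" "\n" with hesc
  have h2 : escaped.toList = ((pvNormCRLF (l.flatMap pvEsc)).map pvCr2nl) := by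
    rw [hesc]
    simp only [PySem.Str.toList_replace]
    rw [show ("\\" : String).toList = ['\\'] from rfl,
        show ("\\\\" : String).toList = ['\\', '\\'] from rfl,
        show ("\"" : String).toList = ['"'] from rfl,
        show ("\\\"" : String).toList = ['\\', '"'] from rfl,
        show ("\r\n" : String).toList = ['\r', '\n'] from rfl,
        show ("\r" : String).toList = ['\r'] from rfl,
        show ("\n" : String).toList = ['\n'] from rfl]
    rw [h1, replace_crlf, replace_single, cr_replace_map]
  have hmain : pvSplitNL escaped.toList = pvAltLines l := by
    rw [h2]; exact main_lemma l
  by_cases hin : PySem.Str.isIn "\n" escaped = false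
  · -- no newline left: A returns the single quoted string
    have hnl : '\n' ∉ escaped.toList := by
      intro hmem
      have ht : PySem.Str.isIn "\n" escaped = true := by
        rw [PySem.Str.isIn_iff_infix]
        exact (singleton_infix_iff '\n' escaped.toList).mpr hmem
      rw [ht] at hin; cases hin
    have hone : pvAltLines l = [escaped.toList] := by
      rw [← hmain, pvSplitNL_no_nl _ hnl]
    rw [hin, if_pos rfl, hone]
    simp only [List.map_cons, List.map_nil, PySem.Str.join, String.toList_ofList,
      PySem.Chars.join_singleton]
  · -- at least one newline: A splits, quotes and joins
    rw [if_neg hin]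
    have hsplit := PySem.Str.split?_map escaped "\n"
    rw [show ("\n" : String).toList = ['\n'] from rfl] at hsplit
    rw [PySem.Chars.split?] at hsplit
    simp only [List.isEmpty_cons, Bool.false_eq_true, if_false, splitOn_nl] at hsplit
    cases hs : PySem.Str.split? escaped "\n" with
    | none => rw [hs] at hsplit; simp at hsplit
    | some lines =>
      rw [hs] at hsplit
      simp only [Option.map_some, Option.some.injEq] at hsplit
      have hlines : List.map String.toList lines = pvAltLines l := by
        rw [hsplit, hmain]
      simp only [Option.getD_some]
      rw [← hlines, List.map_map]
      rfl
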